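-- pv_equiv track=rewrite | github.com/LSwiatek/sw_excercises | excercises/06_search/words2.py | no_repeated_letters
-- ===== SOURCE A (Python) =====
-- def word_has_repeated_letters(word: str):
--     return len(set(word)) != len(word)
--
-- def word_use_same_letter(word1: str, word2: str):
--     return any(word2_letter in word1 for word2_letter in word2)
--
-- def no_repeated_letters(words: [str]):
--     for word in words:
--         if word_has_repeated_letters(word):
--             return False
--
--     if len(words) < 2:
--         return True
--
--     i=0
--     j=1
--     while j < len(words) and i < len(words):
--         if word_use_same_letter(words[i], words[j]):
--             return False
--
--         j += 1
--         if j >= len(words):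
--             i+=1
--             j=i+1
--
--     return True
-- ===== SOURCE B (Python) =====
-- def no_repeated_letters(words: [str]):
--     # All letters across all words are distinct iff the number of distinct
--     # letters equals the total number of letters.
--     seen = set()
--     total = 0
--     for word in words:
--         seen.update(word)
--         total += len(word)
--     return len(seen) == total
-- ===== Notes on version B (the rewrite author's own statement) =====
-- stated objective: simpler
-- what changed: Replaces A's per-word duplicate check plus the index-juggling pairwise letter-overlap while-loop with a single pass that unions all letters into one set and compares the distinct count to the total letter count.
import Mathlib
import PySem

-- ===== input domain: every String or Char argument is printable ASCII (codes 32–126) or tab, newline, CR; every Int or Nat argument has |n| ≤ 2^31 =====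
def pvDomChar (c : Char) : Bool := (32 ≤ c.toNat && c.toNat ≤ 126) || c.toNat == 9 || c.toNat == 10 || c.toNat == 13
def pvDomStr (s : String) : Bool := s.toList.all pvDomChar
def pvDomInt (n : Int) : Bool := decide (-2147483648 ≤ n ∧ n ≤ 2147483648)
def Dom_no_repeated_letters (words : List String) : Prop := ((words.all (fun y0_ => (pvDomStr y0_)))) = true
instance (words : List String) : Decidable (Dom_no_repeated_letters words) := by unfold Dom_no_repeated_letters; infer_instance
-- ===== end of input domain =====

-- B replaces A's per-word duplicate check plus pairwise overlap scan by one pass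
-- that unions all letters into a set and compares distinct count to total count (objective: simpler).

-- ===== PORT A =====
-- len(set(word)) != len(word)
def word_has_repeated_letters (word : String) : Bool :=
  PySem.Set.len (PySem.Set.ofList word.toList) != PySem.Str.len word

-- any(word2_letter in word1 for word2_letter in word2); iterating a str yields
-- its single-character strings, so 'in' is a one-character substring test.
def word_use_same_letter (word1 word2 : String) : Bool :=
  word2.toList.any (fun c => PySem.Str.isIn (String.ofList [c]) word1)

-- the initial 'for word in words: if …: return False' loop of A
def checkWordsA : List String → Bool
  | [] => true
  | w :: ws => if word_has_repeated_letters w then false else checkWordsA ws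

-- A's while loop over the pair (i, j); i and j are Nat since they start at 0, 1
-- and only ever increase.  Python's words[i] is in range whenever it is read
-- (the loop condition guarantees i, j < len(words)), so getD's default is dead.
def loopA (words : List String) (i j : Nat) : Bool :=
  if h : j < words.length ∧ i < words.length then
    if word_use_same_letter (words.getD i "") (words.getD j "") then false
    else if j + 1 ≥ words.length then loopA words (i + 1) (i + 2)
    else loopA words i (j + 1)
  else true
termination_by (words.length * words.length + words.length + 2) - (i * words.length + j)
decreasing_by
  · have : (i + 1) * words.length + (i + 2) ≤ words.length * words.length + words.length + 1 :=
      by nlinarith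
    have : i * words.length + j < (i + 1) * words.length + (i + 2) := by nlinarith
    omega
  · have : i * words.length + j < words.length * words.length + words.length := by nlinarith
    omega

def no_repeated_letters (words : List String) : Bool :=
  if checkWordsA words then
    if words.length < 2 then true
    else loopA words 0 1
  else false

-- ===== PORT B =====
def no_repeated_letters_alt (words : List String) : Bool :=
  let st := words.foldl
    (fun (st : PySem.Set Char × Int) word =>
      (PySem.Set.update st.1 word.toList, st.2 + PySem.Str.len word))
    (PySem.Set.empty, 0)
  PySem.Set.len st.1 == st.2

-- ===== PRECONDITION & SPEC =====
def Spec_no_repeated_letters (words : List String) (out : Bool) : Prop := out = no_repeated_letters_alt words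
instance (words : List String) (out : Bool) : Decidable (Spec_no_repeated_letters words out) := by unfold Spec_no_repeated_letters; infer_instance

-- ===== CLAIM (what is proved, stated in full; the proofs are below) =====
def Claim_equal_no_repeated_letters : Prop := ∀ (words : List String), Dom_no_repeated_letters words → Spec_no_repeated_letters words (no_repeated_letters words)

-- ===== LEMMAS AND PROOFS =====

lemma ofList_sublist {α : Type} [BEq α] [LawfulBEq α] (l : List α) :
    (PySem.Set.ofList l).Sublist l := by
  induction l using List.reverseRecOn with
  | nil => simp [PySem.Set.ofList]
  | append_singleton xs x ih =>
    rw [PySem.Set.ofList_append_singleton, PySem.Set.add_eq_ite]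
    split
    · exact ih.trans (List.sublist_append_left xs [x])
    · exact ih.append (List.Sublist.refl [x])

lemma length_ofList_eq_iff {α : Type} [BEq α] [LawfulBEq α] (l : List α) :
    (PySem.Set.ofList l).length = l.length ↔ l.Nodup := by
  constructor
  · intro h
    have := (ofList_sublist l).eq_of_length h
    rw [← this]; exact PySem.Set.nodup_ofList l
  · intro h; rw [PySem.Set.ofList_eq_self_of_nodup l h]

lemma word_has_repeated_letters_false_iff (word : String) :
    word_has_repeated_letters word = false ↔ word.toList.Nodup := by
  have hlen := length_ofList_eq_iff word.toList
  simp only [word_has_repeated_letters, PySem.Str.len_eq, PySem.Set.len,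
    bne_eq_false_iff_eq, Nat.cast_inj]
  exact hlen

lemma checkWordsA_true_iff (words : List String) :
    checkWordsA words = true ↔ ∀ w ∈ words, w.toList.Nodup := by
  induction words with
  | nil => simp [checkWordsA]
  | cons w ws ih =>
    simp only [checkWordsA, List.mem_cons]
    split
    · rename_i h
      simp only [Bool.false_eq_true, false_iff]
      push Not
      refine ⟨w, Or.inl rfl, ?_⟩
      intro hn
      rw [(word_has_repeated_letters_false_iff w).mpr hn] at h; exact absurd h (by simp)
    · rename_i h
      rw [ih]
      constructor
      · rintro hall x (rfl | hx)
        · exact (word_has_repeated_letters_false_iff x).mp (by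
            cases hw : word_has_repeated_letters x
            · rfl
            · exact absurd hw h)
        · exact hall x hx
      · intro hall x hx; exact hall x (Or.inr hx)

lemma word_use_same_letter_false_iff (w1 w2 : String) :
    word_use_same_letter w1 w2 = false ↔ w1.toList.Disjoint w2.toList := by
  simp only [word_use_same_letter, List.any_eq_false, Bool.not_eq_true]
  constructor
  · intro h a ha hb
    have h2 := h _ hb
    have : PySem.Str.isIn (String.ofList [a]) w1 = true :=
      (PySem.Str.isIn_iff_infix _ _).mpr
        (by simpa using (List.singleton_infix_iff a w1.toList).mpr ha)
    rw [h2] at this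
    exact Bool.false_ne_true this
  · intro h c hc
    cases hcontra : PySem.Str.isIn (String.ofList [c]) w1
    · rfl
    · have := (PySem.Str.isIn_iff_infix _ _).mp hcontra
      have hm : c ∈ w1.toList := (List.singleton_infix_iff c w1.toList).mp (by simpa using this)
      exact absurd hc (h hm)

lemma loopA_true_iff (words : List String) (i j : Nat) (hij : i < j)
    (hinv : j = i + 1 ∨ j < words.length) :
    loopA words i j = true ↔
      ∀ a b : Nat, a < words.length → b < words.length →
        ((a = i ∧ j ≤ b) ∨ (i < a ∧ a < b)) →
        word_use_same_letter (words.getD a "") (words.getD b "") = false := by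
  induction i, j using loopA.induct words with
  | case1 i j hcond hshare =>
    rw [loopA]
    simp only [dif_pos hcond, if_pos hshare]
    apply iff_of_false (by simp)
    intro h
    have := h i j hcond.2 hcond.1 (Or.inl ⟨rfl, le_refl j⟩)
    rw [hshare] at this
    exact absurd this (by simp)
  | case2 i j hcond hshare hend ih =>
    -- j = words.length - 1, move to (i+1, i+2)
    rw [loopA]
    simp only [dif_pos hcond, if_neg hshare, if_pos hend]
    rw [ih (by omega) (Or.inl rfl)]
    have hj : j = words.length - 1 := by omega
    constructor
    · intro h a b ha hb hcase
      rcases hcase with ⟨rfl, hbj⟩ | ⟨hia, hab⟩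
      · -- a = i, b ≥ j = len-1, b < len → b = j
        have : b = j := by omega
        subst this
        simpa using hshare
      · exact h a b ha hb (by omega)
    · intro h a b ha hb hcase
      exact h a b ha hb (by omega)
  | case3 i j hcond hshare hend ih =>
    rw [loopA]
    simp only [dif_pos hcond, if_neg hshare, if_neg hend]
    rw [ih (by omega) (Or.inr (by omega))]
    constructor
    · intro h a b ha hb hcase
      rcases hcase with ⟨rfl, hbj⟩ | ⟨hia, hab⟩
      · rcases Nat.eq_or_lt_of_le hbj with rfl | hlt
        · simpa using hshare
        · exact h a b ha hb (Or.inl ⟨rfl, by omega⟩)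
      · exact h a b ha hb (Or.inr ⟨hia, hab⟩)
    · intro h a b ha hb hcase
      exact h a b ha hb (by omega)
  | case4 i j hcond =>
    rw [loopA]
    simp only [dif_neg hcond, true_iff]
    intro a b ha hb hcase
    exfalso
    rcases hinv with rfl | hjlt
    · omega
    · omega

lemma pairwise_of_short {α : Type} {R : α → α → Prop} (l : List α) (h : l.length < 2) :
    List.Pairwise R l := by
  match l, h with
  | [], _ => exact List.Pairwise.nil
  | [x], _ => simp

lemma A_true_iff (words : List String) :
    no_repeated_letters words = true ↔
      (∀ w ∈ words, w.toList.Nodup) ∧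
      List.Pairwise (fun u v => u.toList.Disjoint v.toList) words := by
  unfold no_repeated_letters
  split
  · rename_i hchk
    rw [checkWordsA_true_iff] at hchk
    split
    · rename_i hlen
      simp only [true_iff]
      exact ⟨hchk, pairwise_of_short words hlen⟩
    · rename_i hlen
      rw [loopA_true_iff words 0 1 (by omega) (Or.inl rfl)]
      rw [List.pairwise_iff_getElem]
      constructor
      · intro h
        refine ⟨hchk, ?_⟩
        intro a b ha hb hab
        have := h a b ha hb (by omega)
        rw [List.getD_eq_getElem words "" ha, List.getD_eq_getElem words "" hb] at this
        exact (word_use_same_letter_false_iff _ _).mp this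
      · rintro ⟨-, hpw⟩ a b ha hb hcase
        rw [List.getD_eq_getElem words "" ha, List.getD_eq_getElem words "" hb]
        exact (word_use_same_letter_false_iff _ _).mpr (hpw a b ha hb (by omega))
  · rename_i hchk
    rw [checkWordsA_true_iff] at hchk
    simp only [Bool.false_eq_true, false_iff]
    intro ⟨h, _⟩
    exact hchk h

lemma foldB_eq (words : List String) (s : PySem.Set Char) (t : Int) :
    words.foldl
      (fun (st : PySem.Set Char × Int) word =>
        (PySem.Set.update st.1 word.toList, st.2 + PySem.Str.len word))
      (s, t)
    = (PySem.Set.update s (words.flatMap String.toList),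
       t + ((words.flatMap String.toList).length : Int)) := by
  induction words generalizing s t with
  | nil => simp [PySem.Set.update]
  | cons w ws ih =>
    simp only [List.foldl_cons, List.flatMap_cons, ih]
    rw [PySem.Set.update_append]
    congr 1
    rw [PySem.Str.len_eq, List.length_append]
    push_cast
    ring

lemma B_true_iff (words : List String) :
    no_repeated_letters_alt words = true ↔ (words.flatMap String.toList).Nodup := by
  unfold no_repeated_letters_alt
  rw [foldB_eq]
  have : PySem.Set.update PySem.Set.empty (words.flatMap String.toList)
      = PySem.Set.ofList (words.flatMap String.toList) := PySem.Set.update_nil_left _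
  rw [this]
  have hlen := length_ofList_eq_iff (words.flatMap String.toList)
  simp only [PySem.Set.len, beq_iff_eq]
  constructor
  · intro h; exact hlen.mp (by omega)
  · intro h; have := hlen.mpr h; omega

-- ===== VERDICT (by name: the statement is the Claim_ definition above) =====
theorem no_repeated_letters_spec : Claim_equal_no_repeated_letters := by
  intro words _
  unfold Spec_no_repeated_letters
  rw [Bool.eq_iff_iff, A_true_iff, B_true_iff]
  rw [List.flatMap_def, List.nodup_flatten, List.pairwise_map]
  simp only [List.forall_mem_map]
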